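-- pv_equiv track=rewrite | github.com/j0zeph/harvard_cs50x_2022_solutions_in_python | 4_credit/list_utils.py | get_every_other_from_end
-- ===== SOURCE A (Python) =====
-- def get_every_other_from_end(list_to_split) -> list:
-- 	"""Returns a list that is a result of getting every other element--starting
-- 	from the second-last, going backwards--in the provided list.
-- 	[1, 2, 3, 4, 5, 6] returns [1, 3, 5] for example.
--
-- 	It is assumed that the length of the list provided is greater than 1.
-- 	If not, an empty list is returned"""
--
-- 	every_other_from_end = []
-- 	list_length = len(list_to_split)
--
-- 	# Accessing second-last element with "-2" index
-- 	start_index = -2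
--
-- 	# Do not go beyond the first element, when looking backwards
-- 	# The + 1 is for the sake of the range() function
-- 	stop_index = -(list_length + 1)
-- 	skip = -2
--
-- 	for index in range(start_index, stop_index, skip):
-- 		every_other_from_end.append(list_to_split[index])
-- 	every_other_from_end.reverse()
--
-- 	return every_other_from_end
-- ===== SOURCE B (Python) =====
-- def get_every_other_from_end(list_to_split) -> list:
-- 	"""Same result as A: every other element starting from the second-last,
-- 	going backwards, returned in ascending order.  Single forward pass:
-- 	the chosen positions are exactly len % 2, len % 2 + 2, ... up to len - 2."""
-- 	result = []
-- 	for i in range(len(list_to_split) % 2, len(list_to_split), 2):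
-- 		result.append(list_to_split[i])
-- 	return result
-- ===== Notes on version B (the rewrite author's own statement) =====
-- stated objective: simpler
-- what changed: Replaces the backward walk over negative indices plus a final reverse() with a single forward pass over range(len%2, len, 2) appending in natural order.
import Mathlib
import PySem

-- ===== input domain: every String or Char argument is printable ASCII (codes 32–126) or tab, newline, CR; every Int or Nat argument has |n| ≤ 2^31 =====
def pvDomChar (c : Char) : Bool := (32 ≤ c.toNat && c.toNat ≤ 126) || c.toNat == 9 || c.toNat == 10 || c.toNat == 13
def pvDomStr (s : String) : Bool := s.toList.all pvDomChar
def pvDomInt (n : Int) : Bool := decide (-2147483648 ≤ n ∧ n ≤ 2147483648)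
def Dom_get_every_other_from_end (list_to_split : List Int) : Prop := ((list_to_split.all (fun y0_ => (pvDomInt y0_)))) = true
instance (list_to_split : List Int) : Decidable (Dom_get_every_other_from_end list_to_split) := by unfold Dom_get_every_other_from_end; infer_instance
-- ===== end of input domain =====

-- B replaces A's backward negative-index walk plus final reverse() with one forward pass in natural order (simpler).


-- ===== PORT A =====
-- literal port of A: walk indices -2, -4, … via range(-2, -(len+1), -2), append each element, then reverse.
-- (every index the range produces is in range for the list, so pyGetD's default is never consulted)
def get_every_other_from_end (list_to_split : List Int) : List Int :=
  let list_length : Int := list_to_split.length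
  let start_index : Int := -2
  let stop_index : Int := -(list_length + 1)
  let skip : Int := -2
  let every_other_from_end :=
    (PySem.List.pyRange start_index stop_index skip).foldl
      (fun acc index => acc ++ [PySem.List.pyGetD list_to_split index 0]) []
  every_other_from_end.reverse

-- ===== PORT B =====
-- literal port of Source B: one forward pass over range(len % 2, len, 2)
def get_every_other_from_end_alt (list_to_split : List Int) : List Int :=
  let n : Int := list_to_split.length
  (PySem.List.pyRange (PySem.Int.mod n 2) n 2).foldl
    (fun acc i => acc ++ [PySem.List.pyGetD list_to_split i 0]) []

-- ===== PRECONDITION & SPEC =====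
def Spec_get_every_other_from_end (list_to_split : List Int) (out : List Int) : Prop := out = get_every_other_from_end_alt list_to_split
instance (list_to_split : List Int) (out : List Int) : Decidable (Spec_get_every_other_from_end list_to_split out) := by unfold Spec_get_every_other_from_end; infer_instance

-- ===== CLAIM (what is proved, stated in full; the proofs are below) =====
def Claim_equal_get_every_other_from_end : Prop := ∀ (list_to_split : List Int), Dom_get_every_other_from_end list_to_split → Spec_get_every_other_from_end list_to_split (get_every_other_from_end list_to_split)

-- ===== LEMMAS AND PROOFS =====

-- A's range, in closed form: n/2 entries, the k-th being -2 - 2k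
theorem rangeA_eq (n : Nat) :
    PySem.List.pyRange (-2) (-((n : Int) + 1)) (-2)
      = List.map (fun k : Nat => (-2 : Int) - 2 * (k : Int)) (List.range (n / 2)) := by
  simp only [PySem.List.pyRange, if_neg (by norm_num : ¬((-2:Int) = 0)),
    if_neg (by norm_num : ¬((0:Int) < -2))]
  by_cases h : -((n : Int) + 1) < -2
  · rw [if_pos h]
    simp only [neg_neg]
    have hc : (((-2:Int) - -(↑n + 1) + 2 - 1) / 2).toNat = n / 2 := by omega
    rw [hc]
    apply List.map_congr_left; intro k _; ring
  · rw [if_neg h]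
    have h0 : n / 2 = 0 := by omega
    simp [h0]

-- B's range, in closed form: n/2 entries, the k-th being n % 2 + 2k
theorem rangeB_eq (n : Nat) :
    PySem.List.pyRange (PySem.Int.mod (n : Int) 2) (n : Int) 2
      = List.map (fun k : Nat => ((n % 2 : Nat) : Int) + 2 * (k : Int)) (List.range (n / 2)) := by
  have hmod : PySem.Int.mod (n : Int) 2 = ((n % 2 : Nat) : Int) := by
    rw [PySem.Int.mod_eq_emod_of_pos (by norm_num)]
    omega
  rw [hmod, PySem.List.pyRange_of_pos _ _ (by norm_num : (0:Int) < 2)]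
  by_cases h : ((n % 2 : Nat) : Int) < n
  · rw [if_pos h]
    have hc : (((n : Int) - ((n % 2 : Nat) : Int) + 2 - 1) / 2).toNat = n / 2 := by omega
    rw [hc]
  · rw [if_neg h]
    have h0 : n / 2 = 0 := by omega
    simp [h0]

-- ===== VERDICT (by name: the statement is the Claim_ definition above) =====
theorem get_every_other_from_end_spec : Claim_equal_get_every_other_from_end := by
  intro xs _
  show get_every_other_from_end xs = get_every_other_from_end_alt xs
  unfold get_every_other_from_end get_every_other_from_end_alt
  dsimp only
  rw [PySem.List.foldl_append_singleton_eq_map, PySem.List.foldl_append_singleton_eq_map,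
      rangeA_eq xs.length, rangeB_eq xs.length, List.nil_append, List.nil_append,
      List.map_map, List.map_map]
  set n := xs.length with hn
  apply List.ext_getElem
  · simp
  · intro i h1 h2
    have hi : i < n / 2 := by simpa using h2
    simp only [List.getElem_reverse, List.length_map, List.length_range,
      List.getElem_map, List.getElem_range, Function.comp_apply]
    simp only [PySem.List.pyGetD]
    have hk : (-2 : Int) - 2 * ((n / 2 - 1 - i : Nat) : Int)
        = -(((2 + 2 * (n / 2 - 1 - i) : Nat) : Int)) := by push_cast [Nat.sub_sub]; omega
    have hj : ((n % 2 : Nat) : Int) + 2 * (i : Int) = ((n % 2 + 2 * i : Nat) : Int) := by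
      push_cast; ring
    rw [hk, hj, PySem.List.pyGet?_neg_natCast xs _ (by omega) (by omega),
        PySem.List.pyGet?_natCast]
    have : n - (2 + 2 * (n / 2 - 1 - i)) = n % 2 + 2 * i := by omega
    rw [this]
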